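-- pv_equiv track=rewrite | github.com/keblato/coding-interview-university | exercises/longest_common_substring.py | recRes
-- ===== SOURCE A (Python) =====
-- from typing import List
--
-- def recRes(word: str, strs: List[str]):
--     encontro = True
--     for k in strs:
--         if word not in k:
--             encontro = False
--             break
--     if encontro:
--         return word
--     else:
--         val1 = recRes(word[1:], strs)
--         val2 = recRes(word[:len(word)-1], strs)
--         return val1 if len(val1) > len(val2) else val2
-- ===== SOURCE B (Python) =====
-- from typing import List
--
-- def recRes(word: str, strs: List[str]):
--     # Bottom-up DP over substring (start, length) instead of exponential recursion.
--     n = len(word)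
--     row = ["" for _ in range(n + 1)]  # results for length-0 substrings at starts 0..n
--     for l in range(1, n + 1):
--         new = []
--         for i in range(n - l + 1):
--             sub = word[i:i + l]
--             if all(sub in k for k in strs):
--                 new.append(sub)
--             else:
--                 v1, v2 = row[i + 1], row[i]
--                 new.append(v1 if len(v1) > len(v2) else v2)
--         row = new
--     return row[0]
-- ===== Notes on version B (the rewrite author's own statement) =====
-- stated objective: faster
-- what changed: Replaces the exponential double recursion over word[1:]/word[:-1] with a bottom-up dynamic-programming table over (start,length) substrings, one row per length.
import Mathlib
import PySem

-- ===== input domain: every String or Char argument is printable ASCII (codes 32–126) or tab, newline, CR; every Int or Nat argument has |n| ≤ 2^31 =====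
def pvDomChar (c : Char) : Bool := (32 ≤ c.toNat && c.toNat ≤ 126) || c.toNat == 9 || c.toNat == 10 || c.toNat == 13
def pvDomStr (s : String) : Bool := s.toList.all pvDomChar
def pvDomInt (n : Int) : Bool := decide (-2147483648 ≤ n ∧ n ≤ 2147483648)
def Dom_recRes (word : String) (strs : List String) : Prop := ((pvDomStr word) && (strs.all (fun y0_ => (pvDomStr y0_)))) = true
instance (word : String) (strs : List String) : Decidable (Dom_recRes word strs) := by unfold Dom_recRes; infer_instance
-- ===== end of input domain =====

-- B replaces A's exponential double recursion by a bottom-up DP table over (start, length); return value only, no side effects.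

-- ===== PORT A =====
-- termination helper: the empty word is 'in' every string, so the else branch has word ≠ []
theorem recResA_nil_all (strs : List (List Char)) :
    strs.all (fun k => PySem.Chars.isIn [] k) = true := by
  simp [List.all_eq_true, PySem.Chars.isIn_nil]

-- the 'encontro' loop with break is the short-circuit ∀ over strs: strs.all (word in k)
def recResChars (word : List Char) (strs : List (List Char)) : List Char :=
  if h : strs.all (fun k => PySem.Chars.isIn word k) then word
  else
    let val1 := recResChars word.tail strs        -- word[1:]            (PySem.List.slice_from_one)
    let val2 := recResChars word.dropLast strs    -- word[:len(word)-1]  (= dropLast)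
    if val1.length > val2.length then val1 else val2
termination_by word.length
decreasing_by
  · have hw : word ≠ [] := by rintro rfl; exact h (recResA_nil_all strs)
    cases word with
    | nil => exact absurd rfl hw
    | cons a t => simp [List.tail]
  · have hw : word ≠ [] := by rintro rfl; exact h (recResA_nil_all strs)
    have hp : 0 < word.length := List.length_pos_iff.mpr hw
    simp [List.length_dropLast]; omega

def recRes (word : String) (strs : List String) : String :=
  String.ofList (recResChars word.toList (strs.map String.toList))

-- ===== PORT B =====
-- all(sub in k for k in strs)
def commonB (strs : List (List Char)) (sub : List Char) : Bool :=
  strs.all (fun k => PySem.Chars.isIn sub k)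

-- one inner loop of B: the row of results for all substrings of length l, from the row for l-1
def rowB (word : List Char) (strs : List (List Char)) (l : Nat)
    (row : List (List Char)) : List (List Char) :=
  (List.range (word.length - l + 1)).map (fun i =>
    let sub := (word.drop i).take l                -- word[i:i+l]  (PySem.List.slice_natCast_add)
    if commonB strs sub then sub
    else
      let v1 := row.getD (i + 1) []               -- row[i+1] (always in range)
      let v2 := row.getD i []                     -- row[i]   (always in range)
      if v1.length > v2.length then v1 else v2)

-- for l in range(1, n+1): row = rowB l row (l = l' + 1 over range n); answer = row[0]
def recResAltChars (word : List Char) (strs : List (List Char)) : List Char :=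
  ((List.range word.length).foldl (fun row l' => rowB word strs (l' + 1) row)
      (List.replicate (word.length + 1) [])).getD 0 []

def recRes_alt (word : String) (strs : List String) : String :=
  String.ofList (recResAltChars word.toList (strs.map String.toList))

-- ===== PRECONDITION & SPEC =====
def Spec_recRes (word : String) (strs : List String) (out : String) : Prop := out = recRes_alt word strs
instance (word : String) (strs : List String) (out : String) : Decidable (Spec_recRes word strs out) := by unfold Spec_recRes; infer_instance

-- ===== CLAIM (what is proved, stated in full; the proofs are below) =====
def Claim_equal_recRes : Prop := ∀ (word : String) (strs : List String), Dom_recRes word strs → Spec_recRes word strs (recRes word strs)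

-- ===== LEMMAS AND PROOFS =====

-- recRes on the empty word returns it
theorem recResChars_nil (strs : List (List Char)) : recResChars [] strs = [] := by
  rw [recResChars]
  simp

-- unfolding recRes on a length-(l+1) substring word[i:i+l+1] produces the two length-l subproblems
theorem recResChars_sub (w : List Char) (strs : List (List Char)) (i l : Nat)
    (h : i + (l + 1) ≤ w.length) :
    recResChars ((w.drop i).take (l + 1)) strs =
      (if commonB strs ((w.drop i).take (l + 1)) then (w.drop i).take (l + 1)
       else
         let v1 := recResChars ((w.drop (i + 1)).take l) strs
         let v2 := recResChars ((w.drop i).take l) strs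
         if v1.length > v2.length then v1 else v2) := by
  have hlen : ((w.drop i).take (l + 1)).length = l + 1 := by
    simp [List.length_take, List.length_drop]; omega
  have htail : ((w.drop i).take (l + 1)).tail = (w.drop (i + 1)).take l := by
    rw [← List.drop_one, List.drop_take, List.drop_drop]
    norm_num
  have hlast : ((w.drop i).take (l + 1)).dropLast = (w.drop i).take l := by
    rw [List.dropLast_eq_take, hlen]
    simp [List.take_take]
  rw [recResChars]
  simp only [commonB, htail, hlast]
  rw [dite_eq_ite]

-- the loop invariant: after l rounds, the row holds A's results for all length-l substrings
theorem rowB_inv (w : List Char) (strs : List (List Char)) (l : Nat) (hl : l ≤ w.length) :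
    (List.range l).foldl (fun row l' => rowB w strs (l' + 1) row)
        (List.replicate (w.length + 1) []) =
      (List.range (w.length - l + 1)).map
        (fun i => recResChars ((w.drop i).take l) strs) := by
  induction l with
  | zero =>
      simp [recResChars_nil, List.map_const']
  | succ l ih =>
      have hl' : l ≤ w.length := by omega
      rw [List.range_succ, List.foldl_append, List.foldl_cons, List.foldl_nil, ih hl']
      unfold rowB
      apply List.ext_getElem
      · simp
      intro j h1 h2
      simp only [List.getElem_map, List.getElem_range]
      have hj : j < w.length - (l + 1) + 1 := by simpa using h1
      have hjl : j + (l + 1) ≤ w.length := by omega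
      rw [recResChars_sub w strs j l hjl]
      have hget : ∀ (k : Nat), k < w.length - l + 1 →
          (((List.range (w.length - l + 1)).map
            (fun i => recResChars ((w.drop i).take l) strs)).getD k []) =
            recResChars ((w.drop k).take l) strs := by
        intro k hk
        rw [List.getD_eq_getElem?_getD, List.getElem?_map]
        simp [hk]
      rw [hget (j + 1) (by omega), hget j (by omega)]

-- the char-list equivalence
theorem recResChars_eq (w : List Char) (strs : List (List Char)) :
    recResChars w strs = recResAltChars w strs := by
  unfold recResAltChars
  rw [rowB_inv w strs w.length (le_refl _)]
  simp

-- ===== VERDICT (by name: the statement is the Claim_ definition above) =====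
theorem recRes_spec : Claim_equal_recRes := by
  intro word strs _
  unfold Spec_recRes recRes recRes_alt
  rw [recResChars_eq]
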